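-- pv_equiv track=rewrite | github.com/elliotnunn/tbxi | tbxi/parcels_dump.py | settle_name_votes
-- ===== SOURCE A (Python) =====
-- def settle_name_votes(vote_dict):
--     # Forbid duplicate names
--     duplicate_names = set([''])
--     for ka, va in vote_dict.items():
--         for kb, vb in vote_dict.items():
--             if ka is kb: continue
--
--             for x in va:
--                 if x in vb:
--                     duplicate_names.add(x)
--
--     # Pick the shortest non-duplicate name
--     decision = {}
--     for k, v in vote_dict.items():
--         allowed_names = [x for x in v if x not in duplicate_names]
--         if allowed_names:
--             decision[k] = min(allowed_names, key=len)
--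
--     return decision
-- ===== SOURCE B (Python) =====
-- def settle_name_votes(vote_dict):
--     # One pass: names seen in some earlier entry, and names owned by >= 2 entries.
--     seen = set()
--     duplicate_names = {''}
--     for v in vote_dict.values():
--         for x in set(v):
--             if x in seen:
--                 duplicate_names.add(x)
--             else:
--                 seen.add(x)
--
--     # Running-best scan per key: first shortest allowed name, in original order
--     decision = {}
--     for k, v in vote_dict.items():
--         best = None
--         for x in v:
--             if x not in duplicate_names and (best is None or len(x) < len(best)):
--                 best = x
--         if best is not None:
--             decision[k] = best
--     return decision
-- ===== Notes on version B (the rewrite author's own statement) =====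
-- stated objective: faster
-- what changed: Replaces A's all-pairs comparison of every key's list against every other key's list with a single seen/duplicate two-set pass over the entries, and replaces A's filter-then-min per key with a running-best scan.
import Mathlib
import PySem

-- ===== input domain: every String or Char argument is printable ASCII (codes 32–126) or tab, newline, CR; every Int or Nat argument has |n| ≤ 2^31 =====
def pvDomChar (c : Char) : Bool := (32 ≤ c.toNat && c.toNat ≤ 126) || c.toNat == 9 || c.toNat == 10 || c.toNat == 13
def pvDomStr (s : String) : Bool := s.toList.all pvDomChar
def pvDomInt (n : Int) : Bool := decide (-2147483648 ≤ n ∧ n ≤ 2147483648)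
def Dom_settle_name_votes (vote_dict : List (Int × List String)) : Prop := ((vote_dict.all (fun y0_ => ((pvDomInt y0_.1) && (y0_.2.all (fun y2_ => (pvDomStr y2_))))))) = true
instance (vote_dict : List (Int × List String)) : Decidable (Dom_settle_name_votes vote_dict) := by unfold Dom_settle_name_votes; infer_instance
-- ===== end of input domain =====

-- B replaces A's all-pairs key-list comparison by a single seen/duplicate two-set pass and the
-- per-key filter+min by a running-best scan; the return value is proved equal on every input.

-- ===== PORT A =====
-- 'ka is kb' on two iterations of the same dict's items() is identity of the entry, ported as
-- equality of the enumeration indices.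
def settle_name_votes (vote_dict : List (Int × List String)) : List (Int × String) :=
  let items := PySem.List.enumerate vote_dict 0
  let duplicate_names : PySem.Set String :=
    items.foldl (fun acc a =>
      items.foldl (fun acc b =>
        if a.1 = b.1 then acc
        else a.2.2.foldl (fun acc x => if x ∈ b.2.2 then PySem.Set.add acc x else acc) acc)
        acc)
      (PySem.Set.ofList [""])
  let decision : PySem.Dict Int String :=
    vote_dict.foldl (fun dec kv =>
      let allowed := kv.2.filter (fun x => !(PySem.Set.contains duplicate_names x))
      if allowed.isEmpty then dec
      else dec.insert kv.1 (PySem.List.minD allowed PySem.Str.len ""))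
      PySem.Dict.empty
  decision.items

-- ===== PORT B =====
def settle_name_votes_alt (vote_dict : List (Int × List String)) : List (Int × String) :=
  let st :=
    vote_dict.foldl (fun st kv =>
      (PySem.Set.ofList kv.2).foldl
        (fun st x =>
          if PySem.Set.contains st.1 x then (st.1, PySem.Set.add st.2 x)
          else (PySem.Set.add st.1 x, st.2))
        st)
      ((PySem.Set.empty : PySem.Set String), (PySem.Set.ofList [""] : PySem.Set String))
  let duplicate_names := st.2
  let decision : PySem.Dict Int String :=
    vote_dict.foldl (fun dec kv =>
      let best := kv.2.foldl (fun best x =>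
        if !(PySem.Set.contains duplicate_names x) &&
           (match best with
            | none => true
            | some b => decide (PySem.Str.len x < PySem.Str.len b)) then some x else best)
        none
      match best with
      | some m => dec.insert kv.1 m
      | none => dec)
      PySem.Dict.empty
  decision.items

-- ===== PRECONDITION & SPEC =====
def Spec_settle_name_votes (vote_dict : List (Int × List String)) (out : List (Int × String)) : Prop := out = settle_name_votes_alt vote_dict
instance (vote_dict : List (Int × List String)) (out : List (Int × String)) : Decidable (Spec_settle_name_votes vote_dict out) := by unfold Spec_settle_name_votes; infer_instance

-- ===== CLAIM (what is proved, stated in full; the proofs are below) =====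
def Claim_equal_settle_name_votes : Prop := ∀ (vote_dict : List (Int × List String)), Dom_settle_name_votes vote_dict → Spec_settle_name_votes vote_dict (settle_name_votes vote_dict)

-- ===== LEMMAS AND PROOFS =====

-- number of entries of l whose name list contains y
def pvCnt (y : String) (l : List (Int × List String)) : Nat :=
  l.countP (fun kv => decide (y ∈ kv.2))

-- membership through any fold that only conditionally adds elements to a set
theorem pv_mem_foldl_set {β : Type} (f : PySem.Set String → β → PySem.Set String)
    (P : β → String → Prop)
    (h : ∀ s b y, y ∈ f s b ↔ y ∈ s ∨ P b y) :
    ∀ (l : List β) (s : PySem.Set String) (y : String),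
      y ∈ l.foldl f s ↔ y ∈ s ∨ ∃ b ∈ l, P b y := by
  intro l
  induction l with
  | nil => simp
  | cons x t ih =>
    intro s y
    rw [List.foldl_cons, ih, h]
    constructor
    · rintro ((hs | hp) | ⟨b, hb, hp⟩)
      · exact Or.inl hs
      · exact Or.inr ⟨x, List.mem_cons_self, hp⟩
      · exact Or.inr ⟨b, List.mem_cons_of_mem _ hb, hp⟩
    · rintro (hs | ⟨b, hb, hp⟩)
      · exact Or.inl (Or.inl hs)
      · rcases List.mem_cons.mp hb with rfl | hb
        · exact Or.inl (Or.inr hp)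
        · exact Or.inr ⟨b, hb, hp⟩

-- a name sits in two entries of distinct enumeration index iff it sits in ≥ 2 entries
theorem pv_pairs (y : String) :
    ∀ (l : List (Int × List String)) (s : Int),
      (∃ a ∈ PySem.List.enumerate l s, ∃ b ∈ PySem.List.enumerate l s,
        a.1 ≠ b.1 ∧ y ∈ a.2.2 ∧ y ∈ b.2.2) ↔ 2 ≤ pvCnt y l := by
  intro l
  induction l with
  | nil => simp [PySem.List.enumerate, pvCnt]
  | cons kv t ih =>
    intro s
    rw [PySem.List.enumerate_cons]
    have hgt : ∀ b ∈ PySem.List.enumerate t (s+1), b.1 ≠ s := by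
      intro b hb
      rw [PySem.List.mem_enumerate_iff] at hb
      obtain ⟨k, hk, rfl⟩ := hb
      simp
      omega
    have hex : (∃ b ∈ PySem.List.enumerate t (s+1), y ∈ b.2.2) ↔ 0 < pvCnt y t := by
      rw [pvCnt, List.countP_pos_iff]
      constructor
      · rintro ⟨b, hb, hyb⟩
        rw [PySem.List.mem_enumerate_iff] at hb
        obtain ⟨k, hk, rfl⟩ := hb
        exact ⟨t[k], List.getElem_mem hk, by simpa using hyb⟩
      · rintro ⟨kv', hkv', hp⟩
        obtain ⟨k, hk, rfl⟩ := List.mem_iff_getElem.mp hkv'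
        exact ⟨(s+1+k, t[k]), by rw [PySem.List.mem_enumerate_iff]; exact ⟨k, hk, rfl⟩,
          by simpa using hp⟩
    have hcnt : pvCnt y (kv :: t) = pvCnt y t + (if y ∈ kv.2 then 1 else 0) := by
      simp [pvCnt, List.countP_cons]
    rw [hcnt]
    constructor
    · rintro ⟨a, ha, b, hb, hne, hya, hyb⟩
      rcases List.mem_cons.mp ha with rfl | ha <;> rcases List.mem_cons.mp hb with rfl | hb
      · exact absurd rfl hne
      · have h1 : 0 < pvCnt y t := hex.mp ⟨b, hb, hyb⟩
        simp only at hya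
        rw [if_pos hya]
        omega
      · have h1 : 0 < pvCnt y t := hex.mp ⟨a, ha, hya⟩
        simp only at hyb
        rw [if_pos hyb]
        omega
      · have h2 : 2 ≤ pvCnt y t := (ih (s+1)).mp ⟨a, ha, b, hb, hne, hya, hyb⟩
        omega
    · intro h
      by_cases hy : y ∈ kv.2
      · rw [if_pos hy] at h
        have h1 : 0 < pvCnt y t := by omega
        obtain ⟨b, hb, hyb⟩ := hex.mpr h1
        exact ⟨(s, kv), List.mem_cons_self, b, List.mem_cons_of_mem _ hb,
          fun e => hgt b hb e.symm, hy, hyb⟩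
      · rw [if_neg hy] at h
        obtain ⟨a, ha, b, hb, hne, hya, hyb⟩ := (ih (s+1)).mpr (by omega)
        exact ⟨a, List.mem_cons_of_mem _ ha, b, List.mem_cons_of_mem _ hb, hne, hya, hyb⟩

-- A's duplicate set, characterised by the entry count
theorem pv_dupA_char (l : List (Int × List String)) (y : String) :
    (y ∈ (PySem.List.enumerate l 0).foldl (fun acc a =>
      (PySem.List.enumerate l 0).foldl (fun acc b =>
        if a.1 = b.1 then acc
        else a.2.2.foldl (fun acc x => if x ∈ b.2.2 then PySem.Set.add acc x else acc) acc)
        acc)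
      (PySem.Set.ofList [""])) ↔ y = "" ∨ 2 ≤ pvCnt y l := by
  have hinner : ∀ (va vb : List String) (acc : PySem.Set String) (y : String),
      y ∈ va.foldl (fun acc x => if x ∈ vb then PySem.Set.add acc x else acc) acc ↔
        y ∈ acc ∨ (y ∈ va ∧ y ∈ vb) := by
    intro va vb acc y
    rw [pv_mem_foldl_set (P := fun x y => x ∈ vb ∧ y = x)
      (h := by
        intro s b y
        split_ifs with hb
        · rw [PySem.Set.mem_add]; tauto
        · tauto)]
    constructor
    · rintro (h | ⟨x, hx, hxv, rfl⟩)
      · exact Or.inl h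
      · exact Or.inr ⟨hx, hxv⟩
    · rintro (h | ⟨h1, h2⟩)
      · exact Or.inl h
      · exact Or.inr ⟨y, h1, h2, rfl⟩
  have hmid : ∀ (a : Int × Int × List String) (acc : PySem.Set String) (y : String),
      y ∈ (PySem.List.enumerate l 0).foldl (fun acc b =>
        if a.1 = b.1 then acc
        else a.2.2.foldl (fun acc x => if x ∈ b.2.2 then PySem.Set.add acc x else acc) acc)
        acc ↔
      y ∈ acc ∨ ∃ b ∈ PySem.List.enumerate l 0, a.1 ≠ b.1 ∧ y ∈ a.2.2 ∧ y ∈ b.2.2 := by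
    intro a acc y
    rw [pv_mem_foldl_set (P := fun b y => a.1 ≠ b.1 ∧ y ∈ a.2.2 ∧ y ∈ b.2.2)
      (h := by
        intro s b y
        split_ifs with hb
        · simp [hb]
        · rw [hinner]; tauto)]
  rw [pv_mem_foldl_set
    (P := fun a y => ∃ b ∈ PySem.List.enumerate l 0, a.1 ≠ b.1 ∧ y ∈ a.2.2 ∧ y ∈ b.2.2)
    (h := by intro s a y; rw [hmid])]
  rw [← pv_pairs y l 0]
  simp [PySem.Set.mem_ofList]

-- B's inner loop over the distinct names of one entry, seen/duplicate invariant
theorem pv_entry :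
    ∀ (ns : List String), ns.Nodup →
    ∀ (s d : PySem.Set String) (y : String),
      (y ∈ (ns.foldl (fun st x =>
        if PySem.Set.contains st.1 x then (st.1, PySem.Set.add st.2 x)
        else (PySem.Set.add st.1 x, st.2)) (s, d)).1 ↔ y ∈ s ∨ y ∈ ns) ∧
      (y ∈ (ns.foldl (fun st x =>
        if PySem.Set.contains st.1 x then (st.1, PySem.Set.add st.2 x)
        else (PySem.Set.add st.1 x, st.2)) (s, d)).2 ↔ y ∈ d ∨ (y ∈ ns ∧ y ∈ s)) := by
  intro ns
  induction ns with
  | nil => intro _ s d y; simp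
  | cons x t ih =>
    intro hnd s d y
    obtain ⟨hx, hnd'⟩ := List.nodup_cons.mp hnd
    rw [List.foldl_cons]
    by_cases hxs : x ∈ s
    · rw [if_pos (PySem.Set.contains_iff _ _ |>.mpr hxs)]
      obtain ⟨h1, h2⟩ := ih hnd' s (PySem.Set.add d x) y
      refine ⟨?_, ?_⟩
      · rw [h1]
        simp only [List.mem_cons]
        constructor
        · rintro (hs | ht)
          · exact Or.inl hs
          · exact Or.inr (Or.inr ht)
        · rintro (hs | rfl | ht)
          · exact Or.inl hs
          · exact Or.inl hxs
          · exact Or.inr ht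
      · rw [h2, PySem.Set.mem_add]
        simp only [List.mem_cons]
        constructor
        · rintro ((hd | rfl) | ⟨ht, hs⟩)
          · exact Or.inl hd
          · exact Or.inr ⟨Or.inl rfl, hxs⟩
          · exact Or.inr ⟨Or.inr ht, hs⟩
        · rintro (hd | ⟨(rfl | ht), hs⟩)
          · exact Or.inl (Or.inl hd)
          · exact Or.inl (Or.inr rfl)
          · exact Or.inr ⟨ht, hs⟩
    · rw [if_neg (by rw [Bool.not_eq_true, ← Bool.not_eq_true']; simpa [PySem.Set.contains_iff] using hxs)]
      obtain ⟨h1, h2⟩ := ih hnd' (PySem.Set.add s x) d y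
      refine ⟨?_, ?_⟩
      · rw [h1, PySem.Set.mem_add]
        simp only [List.mem_cons]; tauto
      · rw [h2, PySem.Set.mem_add]
        simp only [List.mem_cons]
        constructor
        · rintro (hd | ⟨ht, hs | rfl⟩)
          · exact Or.inl hd
          · exact Or.inr ⟨Or.inr ht, hs⟩
          · exact absurd ht hx
        · rintro (hd | ⟨(rfl | ht), hs⟩)
          · exact Or.inl hd
          · exact absurd hs hxs
          · exact Or.inr ⟨ht, Or.inl hs⟩

-- B's one-pass scan, seen/duplicate invariant over the whole entry list
theorem pv_scan :
    ∀ (l : List (Int × List String)) (s d : PySem.Set String) (y : String),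
      (y ∈ (l.foldl (fun st kv =>
        (PySem.Set.ofList kv.2).foldl (fun st x =>
          if PySem.Set.contains st.1 x then (st.1, PySem.Set.add st.2 x)
          else (PySem.Set.add st.1 x, st.2)) st) (s, d)).1 ↔ y ∈ s ∨ 1 ≤ pvCnt y l) ∧
      (y ∈ (l.foldl (fun st kv =>
        (PySem.Set.ofList kv.2).foldl (fun st x =>
          if PySem.Set.contains st.1 x then (st.1, PySem.Set.add st.2 x)
          else (PySem.Set.add st.1 x, st.2)) st) (s, d)).2 ↔
        y ∈ d ∨ (y ∈ s ∧ 1 ≤ pvCnt y l) ∨ 2 ≤ pvCnt y l) := by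
  intro l
  induction l with
  | nil => intro s d y; simp [pvCnt]
  | cons kv t ih =>
    intro s d y
    rw [List.foldl_cons]
    have hstep := pv_entry (PySem.Set.ofList kv.2) (PySem.Set.nodup_ofList _) s d
    set r := (PySem.Set.ofList kv.2).foldl (fun st x =>
      if PySem.Set.contains st.1 x then (st.1, PySem.Set.add st.2 x)
      else (PySem.Set.add st.1 x, st.2)) (s, d) with hr
    obtain ⟨h1, h2⟩ := hstep y
    have hrr : r = (r.1, r.2) := rfl
    rw [hrr]
    obtain ⟨g1, g2⟩ := ih r.1 r.2 y
    have hcnt : pvCnt y (kv :: t) = pvCnt y t + (if y ∈ kv.2 then 1 else 0) := by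
      simp [pvCnt, List.countP_cons]
    rw [hcnt]
    simp only [PySem.Set.mem_ofList] at h1 h2
    constructor
    · rw [g1, h1]
      by_cases hy : y ∈ kv.2
      · rw [if_pos hy]
        constructor
        · rintro ((hs | hk) | hc)
          · exact Or.inl hs
          · exact Or.inr (by omega)
          · exact Or.inr (by omega)
        · rintro (hs | hc)
          · exact Or.inl (Or.inl hs)
          · rcases Nat.lt_or_ge (pvCnt y t) 1 with h | h
            · exact Or.inl (Or.inr hy)
            · exact Or.inr h
      · rw [if_neg hy]
        constructor
        · rintro ((hs | hk) | hc)
          · exact Or.inl hs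
          · exact absurd hk hy
          · exact Or.inr (by omega)
        · rintro (hs | hc)
          · exact Or.inl (Or.inl hs)
          · exact Or.inr (by omega)
    · rw [g2, h2, h1]
      by_cases hy : y ∈ kv.2
      · rw [if_pos hy]
        constructor
        · rintro ((hd | ⟨_, hs⟩) | ⟨(hs | hk), hc⟩ | hc)
          · exact Or.inl hd
          · exact Or.inr (Or.inl ⟨hs, by omega⟩)
          · exact Or.inr (Or.inl ⟨hs, by omega⟩)
          · exact Or.inr (Or.inr (by omega))
          · exact Or.inr (Or.inr (by omega))
        · rintro (hd | ⟨hs, _⟩ | hc)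
          · exact Or.inl (Or.inl hd)
          · exact Or.inl (Or.inr ⟨hy, hs⟩)
          · exact Or.inr (Or.inl ⟨Or.inr hy, by omega⟩)
      · rw [if_neg hy]
        constructor
        · rintro ((hd | ⟨hk, _⟩) | ⟨(hs | hk), hc⟩ | hc)
          · exact Or.inl hd
          · exact absurd hk hy
          · exact Or.inr (Or.inl ⟨hs, by omega⟩)
          · exact absurd hk hy
          · exact Or.inr (Or.inr (by omega))
        · rintro (hd | ⟨hs, hc⟩ | hc)
          · exact Or.inl (Or.inl hd)
          · exact Or.inr (Or.inl ⟨Or.inl hs, by omega⟩)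
          · exact Or.inr (Or.inr (by omega))

-- B's duplicate set, characterised by the entry count
theorem pv_dupB_char (l : List (Int × List String)) (y : String) :
    (y ∈ (l.foldl (fun st kv =>
      (PySem.Set.ofList kv.2).foldl (fun st x =>
        if PySem.Set.contains st.1 x then (st.1, PySem.Set.add st.2 x)
        else (PySem.Set.add st.1 x, st.2)) st)
      ((PySem.Set.empty : PySem.Set String), (PySem.Set.ofList [""] : PySem.Set String))).2) ↔
    y = "" ∨ 2 ≤ pvCnt y l := by
  rw [(pv_scan l PySem.Set.empty (PySem.Set.ofList [""]) y).2]
  simp [PySem.Set.mem_ofList, PySem.Set.empty]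

-- the running-best scan with an allowance predicate is min(filter, key=len)
theorem pv_best_eq_min (q : String → Bool) (v : List String) :
    v.foldl (fun best x =>
      if q x && (match best with
                 | none => true
                 | some b => decide (PySem.Str.len x < PySem.Str.len b)) then some x else best)
      none = PySem.List.min? (v.filter q) PySem.Str.len := by
  have h2 : (fun (best : Option String) (x : String) =>
      if q x && (match best with
                 | none => true
                 | some b => decide (PySem.Str.len x < PySem.Str.len b)) then some x else best) =
      (fun (best : Option String) (x : String) =>
        if q x then (match best with
          | none => some x
          | some m => if PySem.Str.len x < PySem.Str.len m then some x else some m) else best) := by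
    funext best x
    cases best with
    | none => simp
    | some b => by_cases hq : q x <;> simp [hq]
  rw [h2, PySem.List.foldl_if_eq_foldl_filter]
  simp only [PySem.List.min?]
  congr 1
  funext best x
  cases best <;> rfl

-- the two decision loops agree whenever the forbidden sets agree pointwise
theorem pv_phase2 (l : List (Int × List String)) (dA dB : PySem.Set String)
    (hc : ∀ x, PySem.Set.contains dA x = PySem.Set.contains dB x) :
    (l.foldl (fun dec kv =>
      let allowed := kv.2.filter (fun x => !(PySem.Set.contains dA x))
      if allowed.isEmpty then dec
      else dec.insert kv.1 (PySem.List.minD allowed PySem.Str.len ""))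
      PySem.Dict.empty) =
    (l.foldl (fun dec kv =>
      let best := kv.2.foldl (fun best x =>
        if !(PySem.Set.contains dB x) &&
           (match best with
            | none => true
            | some b => decide (PySem.Str.len x < PySem.Str.len b)) then some x else best)
        none
      match best with
      | some m => dec.insert kv.1 m
      | none => dec)
      PySem.Dict.empty) := by
  have hstep : ∀ (dec : PySem.Dict Int String) (kv : Int × List String),
      (let allowed := kv.2.filter (fun x => !(PySem.Set.contains dA x))
       if allowed.isEmpty then dec
       else dec.insert kv.1 (PySem.List.minD allowed PySem.Str.len "")) =
      (let best := kv.2.foldl (fun best x =>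
        if !(PySem.Set.contains dB x) &&
           (match best with
            | none => true
            | some b => decide (PySem.Str.len x < PySem.Str.len b)) then some x else best)
        none
       match best with
       | some m => dec.insert kv.1 m
       | none => dec) := by
    intro dec kv
    have hq : (fun x => !(PySem.Set.contains dA x)) = (fun x => !(PySem.Set.contains dB x)) := by
      funext x; rw [hc]
    dsimp only
    rw [hq, pv_best_eq_min]
    cases hmin : PySem.List.min? (kv.2.filter (fun x => !(PySem.Set.contains dB x))) PySem.Str.len with
    | none =>
      have he : kv.2.filter (fun x => !(PySem.Set.contains dB x)) = [] :=
        (PySem.List.min?_eq_none_iff _ _).mp hmin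
      rw [he]
      rfl
    | some m =>
      have hne : kv.2.filter (fun x => !(PySem.Set.contains dB x)) ≠ [] := by
        intro h
        rw [(PySem.List.min?_eq_none_iff _ _).mpr h] at hmin
        simp at hmin
      rw [if_neg (by simpa [List.isEmpty_iff] using hne)]
      rw [PySem.List.minD, hmin]
      rfl
  apply PySem.List.foldl_congr_mem
  intro dec kv _
  exact hstep dec kv

-- ===== VERDICT (by name: the statement is the Claim_ definition above) =====
theorem settle_name_votes_spec : Claim_equal_settle_name_votes := by
  intro l _
  unfold Spec_settle_name_votes
  simp only [settle_name_votes, settle_name_votes_alt]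
  refine congrArg PySem.Dict.items ?_
  apply pv_phase2
  intro x
  rw [Bool.eq_iff_iff, PySem.Set.contains_iff, PySem.Set.contains_iff,
    pv_dupA_char, pv_dupB_char]
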